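-- pv_equiv track=rewrite | github.com/CahootsMalone/sentient-stuff | scripts/sentient-misc-database-text-parser.py | generate_link_text2
-- ===== SOURCE A (Python) =====
-- LINK_INVALID = 65535 # If this is a link destination, no link appears at the corresponding security clearance level.
--
-- def generate_link_text2(link_name, link_list):
--
--     link_text = ""
--
--     added_first_link = False
--     added_text_for_first_link = False
--
--     cur_link_destination = -1
--     cur_link_desc = ""
--
--     for link_index in range(len(link_list)):
--         link = link_list[link_index]
--         if link != LINK_INVALID:
--             if not added_first_link:
--                 cur_link_destination = link
--                 cur_link_desc += f"{link_name} L{str(link_index + 1)}"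
--                 added_first_link = True
--             else:
--                 if link == cur_link_destination: # Link for this clearance level is the same as the link for the previous level.
--                     cur_link_desc += f"/L{str(link_index + 1)}"
--                 else:
--                     if added_text_for_first_link:
--                         link_text += ' ' # Space between links.
--                     else:
--                         added_text_for_first_link = True
--
--                     link_text += '<a href="' + str(cur_link_destination) + '.html">' + cur_link_desc + '</a>'
--
--                     cur_link_destination = link
--                     cur_link_desc = f"L{str(link_index + 1)}"
--
--     if added_text_for_first_link:
--         link_text += ' ' # Space between links.
--     else:
--         added_text_for_first_link = True
--
--     link_text += '<a href="' + str(cur_link_destination) + '.html">' + cur_link_desc + '</a>'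
--
--     return link_text
-- ===== SOURCE B (Python) =====
-- LINK_INVALID = 65535  # destinations equal to this are skipped
--
--
-- def generate_link_text2(link_name, link_list):
--     # Pass 1: group consecutive valid entries with equal destinations,
--     # recording each entry's clearance-level number (index + 1).
--     groups = []
--     for index, link in enumerate(link_list):
--         if link == LINK_INVALID:
--             continue
--         if groups and groups[-1][0] == link:
--             groups[-1][1].append(index + 1)
--         else:
--             groups.append((link, [index + 1]))
--     # Pass 2: render each group; the first group's description carries the link name.
--     parts = []
--     for gi, (dest, levels) in enumerate(groups):
--         desc = '/'.join('L' + str(n) for n in levels)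
--         if gi == 0:
--             desc = link_name + ' ' + desc
--         parts.append('<a href="' + str(dest) + '.html">' + desc + '</a>')
--     return ' '.join(parts)
-- ===== Notes on version B (the rewrite author's own statement) =====
-- stated objective: alternative
-- what changed: Replaces A's single-pass five-variable flush-as-you-go state machine with a two-pass decomposition: first group consecutive valid entries by equal destination into (destination, levels) groups, then render each group as an anchor tag and join with spaces.
-- intended difference: On inputs with no valid link (every entry equals 65535, including the empty list), A returns the sentinel anchor '<a href="-1.html"></a>' because its -1 initializer leaks into the output, while B returns the empty string, the intended rendering when there are no links. — e.g. on generate_link_text2("x", []): A returns "<a href=\"-1.html\"></a>", B returns ""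
import Mathlib
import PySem

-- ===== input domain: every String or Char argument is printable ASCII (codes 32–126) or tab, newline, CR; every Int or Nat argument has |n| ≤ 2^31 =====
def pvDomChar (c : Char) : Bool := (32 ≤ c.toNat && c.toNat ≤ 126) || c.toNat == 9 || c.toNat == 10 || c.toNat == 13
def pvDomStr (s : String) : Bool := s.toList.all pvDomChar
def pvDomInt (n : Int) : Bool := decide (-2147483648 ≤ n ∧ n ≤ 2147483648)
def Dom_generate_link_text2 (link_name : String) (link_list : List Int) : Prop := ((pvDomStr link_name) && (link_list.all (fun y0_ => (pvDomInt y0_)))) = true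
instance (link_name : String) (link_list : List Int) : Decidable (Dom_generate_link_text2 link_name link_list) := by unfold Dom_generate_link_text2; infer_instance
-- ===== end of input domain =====

-- B replaces A's five-variable flush-as-you-go state machine by a two-pass decomposition
-- (group consecutive equal destinations first, then render each group); objective: alternative decomposition, same cost.

-- ===== PORT A =====
-- state = (link_text, added_first_link, added_text_for_first_link, cur_link_destination, cur_link_desc)
def pvAStep (link_name : String) (st : String × Bool × Bool × Int × String) (p : Int × Int) :
    String × Bool × Bool × Int × String :=
  match st, p with
  | (link_text, added_first, added_text, cur_dest, cur_desc), (link_index, link) =>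
    if link ≠ 65535 then
      if !added_first then
        (link_text, true, added_text, link,
          cur_desc ++ (link_name ++ " L" ++ PySem.Int.toStr (link_index + 1)))
      else if link = cur_dest then
        (link_text, added_first, added_text, cur_dest,
          cur_desc ++ ("/L" ++ PySem.Int.toStr (link_index + 1)))
      else
        ((if added_text then link_text ++ " " else link_text) ++
           ("<a href=\"" ++ PySem.Int.toStr cur_dest ++ ".html\">" ++ cur_desc ++ "</a>"),
         added_first, true, link, "L" ++ PySem.Int.toStr (link_index + 1))
    else (link_text, added_first, added_text, cur_dest, cur_desc)

def generate_link_text2 (link_name : String) (link_list : List Int) : String :=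
  let st := (PySem.List.enumerate link_list).foldl (pvAStep link_name) ("", false, false, -1, "")
  match st with
  | (link_text, _, added_text, cur_dest, cur_desc) =>
    (if added_text then link_text ++ " " else link_text) ++
      ("<a href=\"" ++ PySem.Int.toStr cur_dest ++ ".html\">" ++ cur_desc ++ "</a>")

-- ===== PORT B =====
-- groups: list of (destination, level numbers); Source B appends to groups[-1] or pushes a new group
def pvBStep (groups : List (Int × List Int)) (p : Int × Int) : List (Int × List Int) :=
  if p.2 = 65535 then groups
  else
    match groups.getLast? with
    | some (d, ls) =>
        if d = p.2 then groups.dropLast ++ [(d, ls ++ [p.1 + 1])]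
        else groups ++ [(p.2, [p.1 + 1])]
    | none => [(p.2, [p.1 + 1])]

def pvDescOf (ls : List Int) : String :=
  PySem.Str.join "/" (ls.map (fun n => "L" ++ PySem.Int.toStr n))

def pvRenderGroup (link_name : String) (p : Int × (Int × List Int)) : String :=
  let desc := pvDescOf p.2.2
  let desc := if p.1 = 0 then link_name ++ " " ++ desc else desc
  "<a href=\"" ++ PySem.Int.toStr p.2.1 ++ ".html\">" ++ desc ++ "</a>"

def generate_link_text2_alt (link_name : String) (link_list : List Int) : String :=
  let groups := (PySem.List.enumerate link_list).foldl pvBStep []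
  PySem.Str.join " " ((PySem.List.enumerate groups).map (pvRenderGroup link_name))

-- ===== PRECONDITION & SPEC =====
-- On inputs with no valid link (every entry equals 65535, including the empty list),
-- A returns the sentinel anchor '<a href="-1.html"></a>' because its -1 initializer
-- leaks into the output, while B returns the empty string, the intended rendering
-- when there are no links.
def D_generate_link_text2 (link_name : String) (link_list : List Int) : Prop :=
  ∀ x ∈ link_list, x = 65535
instance (link_name : String) (link_list : List Int) : Decidable (D_generate_link_text2 link_name link_list) := by unfold D_generate_link_text2; infer_instance

def Spec_generate_link_text2 (link_name : String) (link_list : List Int) (out : String) : Prop := ¬ D_generate_link_text2 link_name link_list → out = generate_link_text2_alt link_name link_list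
instance (link_name : String) (link_list : List Int) (out : String) : Decidable (Spec_generate_link_text2 link_name link_list out) := by unfold Spec_generate_link_text2; infer_instance

def pvDiffWitness_generate_link_text2 : String × List Int := ("x", [])
def pvDiffWitnessOut_generate_link_text2 : String × String := ("<a href=\"-1.html\"></a>", "")

-- ===== CLAIM (what is proved, stated in full; the proofs are below) =====
def Claim_unchanged_generate_link_text2 : Prop := ∀ (link_name : String) (link_list : List Int), Dom_generate_link_text2 link_name link_list → Spec_generate_link_text2 link_name link_list (generate_link_text2 link_name link_list)
def Claim_changed_generate_link_text2 : Prop := Dom_generate_link_text2 (pvDiffWitness_generate_link_text2.1) (pvDiffWitness_generate_link_text2.2) ∧ D_generate_link_text2 (pvDiffWitness_generate_link_text2.1) (pvDiffWitness_generate_link_text2.2) ∧ generate_link_text2 (pvDiffWitness_generate_link_text2.1) (pvDiffWitness_generate_link_text2.2) = pvDiffWitnessOut_generate_link_text2.1 ∧ generate_link_text2_alt (pvDiffWitness_generate_link_text2.1) (pvDiffWitness_generate_link_text2.2) = pvDiffWitnessOut_generate_link_text2.2 ∧ pvDiffWitnessOut_generate_link_text2.1 ≠ pvDiffWitnessOu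t_generate_link_text2.2
def Claim_exact_generate_link_text2 : Prop := ∀ (link_name : String) (link_list : List Int), Dom_generate_link_text2 link_name link_list → D_generate_link_text2 link_name link_list → generate_link_text2 link_name link_list ≠ generate_link_text2_alt link_name link_list

-- ===== LEMMAS AND PROOFS =====

-- rendered group: `first` says whether the group is the global first (gets the link_name prefix)
def pvRendG (link_name : String) (first : Bool) (g : Int × List Int) : String :=
  "<a href=\"" ++ PySem.Int.toStr g.1 ++ ".html\">" ++
    ((if first then link_name ++ " " else "") ++ pvDescOf g.2) ++ "</a>"

def pvRList (link_name : String) : List (Int × List Int) → List String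
  | [] => []
  | g :: gs => pvRendG link_name true g :: gs.map (pvRendG link_name false)

-- A's abstract state as a function of B's groups
def pvStateOf (link_name : String) (groups : List (Int × List Int)) :
    String × Bool × Bool × Int × String :=
  match groups.getLast? with
  | none => ("", false, false, -1, "")
  | some (d, ls) =>
      let fs := groups.dropLast
      (PySem.Str.join " " (pvRList link_name fs), true, !fs.isEmpty, d,
        (if fs.isEmpty then link_name ++ " " else "") ++ pvDescOf ls)

def pvWF (groups : List (Int × List Int)) : Prop := ∀ g ∈ groups, g.2 ≠ []

theorem pvJoin_cons_cons (sep a b : String) (l : List String) :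
    PySem.Str.join sep (a :: b :: l) = a ++ sep ++ PySem.Str.join sep (b :: l) := by
  simp [PySem.Str.join, PySem.Chars.join_cons_cons, String.append_assoc]

theorem pvJoin_append_singleton (sep x : String) (xs : List String) (h : xs ≠ []) :
    PySem.Str.join sep (xs ++ [x]) = PySem.Str.join sep xs ++ sep ++ x := by
  induction xs with
  | nil => simp at h
  | cons a t ih =>
    cases t with
    | nil =>
      simp [PySem.Str.join, PySem.Chars.join_cons_cons, PySem.Chars.join_singleton,
        String.append_assoc]
    | cons b u =>
      simp only [List.cons_append] at ih ⊢
      rw [pvJoin_cons_cons, pvJoin_cons_cons, ih (by simp)]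
      simp [String.append_assoc]

theorem pvDescOf_append (ls : List Int) (n : Int) (h : ls ≠ []) :
    pvDescOf (ls ++ [n]) = pvDescOf ls ++ ("/L" ++ PySem.Int.toStr n) := by
  unfold pvDescOf
  rw [List.map_append, List.map_singleton,
    pvJoin_append_singleton _ _ _ (by simpa using h), String.append_assoc]
  simp only [show ("/L" : String) = "/" ++ "L" from rfl, String.append_assoc]

theorem pvRList_append (name : String) (fs : List (Int × List Int)) (g : Int × List Int) :
    pvRList name (fs ++ [g]) = pvRList name fs ++ [pvRendG name fs.isEmpty g] := by
  cases fs <;> simp [pvRList]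

theorem pvRList_ne_nil (name : String) (fs : List (Int × List Int)) (h : fs ≠ []) :
    pvRList name fs ≠ [] := by
  cases fs <;> simp [pvRList] at *

def pvFinal (st : String × Bool × Bool × Int × String) : String :=
  (if st.2.2.1 then st.1 ++ " " else st.1) ++
    ("<a href=\"" ++ PySem.Int.toStr st.2.2.2.1 ++ ".html\">" ++ st.2.2.2.2 ++ "</a>")

theorem pvStateOf_concat (name : String) (fs : List (Int × List Int)) (d : Int) (ls : List Int) :
    pvStateOf name (fs ++ [(d, ls)]) =
      (PySem.Str.join " " (pvRList name fs), true, !fs.isEmpty, d,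
        (if fs.isEmpty then name ++ " " else "") ++ pvDescOf ls) := by
  simp only [pvStateOf, List.getLast?_concat, List.dropLast_concat]

-- A's flush/finalize expression, applied to the abstract state of a nonempty groups list
theorem pvFlush_eq (name : String) (fs : List (Int × List Int)) (d : Int) (ls : List Int) :
    (if !fs.isEmpty then PySem.Str.join " " (pvRList name fs) ++ " "
      else PySem.Str.join " " (pvRList name fs)) ++
      ("<a href=\"" ++ PySem.Int.toStr d ++ ".html\">" ++
        ((if fs.isEmpty then name ++ " " else "") ++ pvDescOf ls) ++ "</a>")
      = PySem.Str.join " " (pvRList name (fs ++ [(d, ls)])) := by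
  rw [pvRList_append]
  cases fs with
  | nil =>
    simp only [List.isEmpty_nil, Bool.not_true, if_true, Bool.false_eq_true, if_false, pvRList,
      List.nil_append]
    rw [← String.toList_inj]
    simp [pvRendG, PySem.Str.join, PySem.Chars.join_singleton, PySem.Chars.join_nil]
  | cons f t =>
    rw [pvJoin_append_singleton _ _ _ (pvRList_ne_nil name (f :: t) (by simp))]
    simp only [List.isEmpty_cons, Bool.not_false, if_true, Bool.false_eq_true, if_false]
    rw [← String.toList_inj]
    simp [pvRendG]

theorem pvStep_eq (name : String) (groups : List (Int × List Int)) (hwf : pvWF groups)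
    (p : Int × Int) :
    pvAStep name (pvStateOf name groups) p = pvStateOf name (pvBStep groups p) := by
  obtain ⟨i, link⟩ := p
  by_cases hinv : link = 65535
  · simp [pvAStep, pvBStep, hinv]
  · rcases hgl : groups.getLast? with _ | ⟨d, ls⟩
    · -- groups is empty: A starts the first group, B pushes the first group
      have hg : groups = [] := List.getLast?_eq_none_iff.mp hgl
      subst hg
      have hB : pvBStep [] (i, link) = [] ++ [(link, [i + 1])] := by
        simp [pvBStep, hinv]
      rw [hB, pvStateOf_concat]
      simp only [pvAStep, pvStateOf, List.getLast?_nil, hinv, ite_not, Bool.not_false, if_true,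
        if_false, Prod.mk.injEq]
      and_intros <;>
        first
          | trivial
          | (rw [← String.toList_inj]
             simp [pvRList, pvDescOf, PySem.Str.join, PySem.Chars.join_singleton,
               PySem.Chars.join_nil]
             done)
    · -- groups is nonempty with last group (d, ls)
      have hgroups : groups = groups.dropLast ++ [(d, ls)] :=
        (List.dropLast_append_getLast? _ hgl).symm
      have hls : ls ≠ [] := hwf (d, ls) (by rw [hgroups]; simp)
      by_cases hsame : link = d
      · -- same destination: A extends cur_desc, B appends the level to the last group
        subst hsame
        rw [hgroups]
        have hB : pvBStep (groups.dropLast ++ [(link, ls)]) (i, link)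
            = groups.dropLast ++ [(link, ls ++ [i + 1])] := by
          simp [pvBStep, hinv, List.getLast?_concat, List.dropLast_concat]
        rw [hB, pvStateOf_concat, pvStateOf_concat]
        simp only [pvAStep, hinv, ite_not, Bool.not_true, Bool.false_eq_true, if_false, if_true,
          if_pos rfl, Prod.mk.injEq]
        and_intros <;>
          first
            | trivial
            | (rw [pvDescOf_append _ _ hls, String.append_assoc]
               done)
      · -- new destination: A flushes the current group, B pushes a fresh group
        rw [hgroups]
        have hB : pvBStep (groups.dropLast ++ [(d, ls)]) (i, link)
            = (groups.dropLast ++ [(d, ls)]) ++ [(link, [i + 1])] := by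
          simp [pvBStep, hinv, List.getLast?_concat, Ne.symm hsame]
        rw [hB, pvStateOf_concat, pvStateOf_concat]
        simp only [pvAStep, hinv, ite_not, Bool.not_true, Bool.false_eq_true, if_false, if_true,
          if_neg hsame, Prod.mk.injEq]
        and_intros <;>
          first
            | trivial
            | (exact pvFlush_eq name groups.dropLast d ls)
            | (simp
               done)
            | (rw [if_neg (by simp), ← String.toList_inj]
               simp [pvDescOf, PySem.Str.join, PySem.Chars.join_singleton]
               done)

theorem pvWF_step (groups : List (Int × List Int)) (hwf : pvWF groups) (p : Int × Int) :
    pvWF (pvBStep groups p) := by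
  unfold pvBStep
  split
  · exact hwf
  · split
    · split
      · intro g hg
        rcases List.mem_append.mp hg with h | h
        · exact hwf _ (List.mem_of_mem_dropLast h)
        · simp at h; subst h; simp
      · intro g hg
        rcases List.mem_append.mp hg with h | h
        · exact hwf _ h
        · simp at h; subst h; simp
    · intro g hg; simp at hg; subst hg; simp

theorem pvFold_eq (name : String) (l : List (Int × Int)) (groups : List (Int × List Int))
    (hwf : pvWF groups) :
    l.foldl (pvAStep name) (pvStateOf name groups) = pvStateOf name (l.foldl pvBStep groups) := by
  induction l generalizing groups with
  | nil => rfl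
  | cons p t ih =>
    simp only [List.foldl_cons, pvStep_eq name groups hwf p]
    exact ih _ (pvWF_step groups hwf p)

theorem pvEnum_map_tail (name : String) (gs : List (Int × List Int)) (s : Int) (hs : 1 ≤ s) :
    (PySem.List.enumerate gs s).map (pvRenderGroup name) = gs.map (pvRendG name false) := by
  induction gs generalizing s with
  | nil => rfl
  | cons g t ih =>
    rw [PySem.List.enumerate_cons, List.map_cons, List.map_cons, ih (s + 1) (by omega)]
    simp [pvRenderGroup, pvRendG, if_neg (by omega : ¬ s = 0)]

theorem pvEnum_map (name : String) (gs : List (Int × List Int)) :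
    (PySem.List.enumerate gs 0).map (pvRenderGroup name) = pvRList name gs := by
  cases gs with
  | nil => rfl
  | cons g t =>
    rw [PySem.List.enumerate_cons, List.map_cons,
      show (0 : Int) + 1 = 1 by norm_num, pvEnum_map_tail name t 1 le_rfl]
    simp [pvRenderGroup, pvRendG, pvRList]

theorem pvFinal_stateOf (name : String) (fs : List (Int × List Int)) (d : Int) (ls : List Int) :
    pvFinal (pvStateOf name (fs ++ [(d, ls)]))
      = PySem.Str.join " " (pvRList name (fs ++ [(d, ls)])) := by
  rw [pvStateOf_concat]
  exact pvFlush_eq name fs d ls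

theorem pvA_eq (name : String) (ll : List Int) :
    generate_link_text2 name ll
      = pvFinal ((PySem.List.enumerate ll).foldl (pvAStep name) ("", false, false, -1, "")) := rfl

theorem pvBStep_ne_nil (groups : List (Int × List Int)) (hg : groups ≠ []) (p : Int × Int) :
    pvBStep groups p ≠ [] := by
  unfold pvBStep
  split
  · exact hg
  · split
    · split <;> simp
    · simp

theorem pvFold_ne_nil (l : List (Int × Int)) (groups : List (Int × List Int))
    (hg : groups ≠ []) : l.foldl pvBStep groups ≠ [] := by
  induction l generalizing groups with
  | nil => exact hg
  | cons p t ih => exact ih _ (pvBStep_ne_nil groups hg p)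

theorem pvFold_nil_iff (ll : List Int) (s : Int) :
    (PySem.List.enumerate ll s).foldl pvBStep [] = [] ↔ ∀ x ∈ ll, x = 65535 := by
  induction ll generalizing s with
  | nil => simp [PySem.List.enumerate]
  | cons a t ih =>
    rw [PySem.List.enumerate_cons, List.foldl_cons]
    by_cases ha : a = 65535
    · have : pvBStep [] (s, a) = [] := by simp [pvBStep, ha]
      rw [this, ih]
      simp [ha]
    · have : pvBStep [] (s, a) = [(a, [s + 1])] := by simp [pvBStep, ha]
      rw [this]
      constructor
      · intro h
        exact absurd h (pvFold_ne_nil _ _ (by simp))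
      · intro h
        exact absurd (h a (by simp)) ha

theorem generate_link_text2_spec : Claim_unchanged_generate_link_text2 := by
  intro link_name link_list _
  unfold Spec_generate_link_text2
  intro hnd
  rw [pvA_eq,
    show (("", false, false, -1, "") : String × Bool × Bool × Int × String)
      = pvStateOf link_name [] from rfl,
    pvFold_eq link_name _ [] (by intro g hg; simp at hg)]
  simp only [generate_link_text2_alt]
  cases hG : (PySem.List.enumerate link_list).foldl pvBStep [] with
  | nil =>
    exact absurd ((pvFold_nil_iff link_list 0).mp hG) hnd
  | cons g gs =>
    obtain ⟨fs, lastg, hsplit⟩ : ∃ fs lastg, g :: gs = fs ++ [lastg] :=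
      ⟨(g :: gs).dropLast, (g :: gs).getLast (by simp),
        (List.dropLast_append_getLast (by simp)).symm⟩
    obtain ⟨d, ls⟩ := lastg
    rw [hsplit, pvFinal_stateOf, pvEnum_map]

theorem generate_link_text2_changed : Claim_changed_generate_link_text2 := by
  unfold Claim_changed_generate_link_text2; decide

theorem generate_link_text2_tight : Claim_exact_generate_link_text2 := by
  intro link_name link_list _ hD
  have hG : (PySem.List.enumerate link_list).foldl pvBStep [] = [] :=
    (pvFold_nil_iff link_list 0).mpr hD
  rw [pvA_eq,
    show (("", false, false, -1, "") : String × Bool × Bool × Int × String)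
      = pvStateOf link_name [] from rfl,
    pvFold_eq link_name _ [] (by intro g hg; simp at hg)]
  simp only [generate_link_text2_alt, hG]
  rw [show pvStateOf link_name [] = ("", false, false, -1, "") from rfl]
  simp only [PySem.List.enumerate, List.map_nil]
  decide
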